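-- pv_equiv track=rewrite | github.com/Roodster/ai2p-asd | asd/event_scoring/scoring.py | segments_to_events
-- ===== SOURCE A (Python) =====
-- def segments_to_events(lst):
--     # Ensure the input is a list
--     if not isinstance(lst, list):
--         raise ValueError("Input must be a list")
--
--     start_end_times = []
--     in_sequence = False  # To track if we are in a sequence of 1's
--
--     for i in range(len(lst)):
--         if lst[i] == 1:
--             if not in_sequence:
--                 # We've encountered the start of a new sequence
--                 start_index = i
--                 in_sequence = True
--         else:
--             if in_sequence:
--                 # We've reached the end of a sequence of 1's
--                 end_index = i - 1
--                 start_end_times.append((start_index, end_index))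
--                 in_sequence = False
--
--     # If the sequence ended at the last element, close it
--     if in_sequence:
--         end_index = len(lst) - 1
--         start_end_times.append((start_index, end_index))
--
--     # Convert indices to time in seconds
--     time_segments = [(start * 4, (end + 1) * 4) for start, end in start_end_times]
--     return lst,time_segments
-- ===== SOURCE B (Python) =====
-- def segments_to_events(lst):
--     # Ensure the input is a list
--     if not isinstance(lst, list):
--         raise ValueError("Input must be a list")
--     n = len(lst)
--     events = []
--     i = 0
--     while i < n:
--         if lst[i] == 1:
--             j = i
--             while j < n and lst[j] == 1:
--                 j += 1
--             events.append((i * 4, j * 4))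
--             i = j
--         else:
--             i += 1
--     return lst, events
-- ===== Notes on version B (the rewrite author's own statement) =====
-- stated objective: alternative
-- what changed: Replaces A's single-pass boolean state machine (in_sequence flag, deferred index pairs, plus a second conversion pass) with a run-skipping scan: an inner loop jumps over each maximal run of 1's and emits the time interval directly, with no flag, no trailing-run fixup and no second pass.
import Mathlib
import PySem

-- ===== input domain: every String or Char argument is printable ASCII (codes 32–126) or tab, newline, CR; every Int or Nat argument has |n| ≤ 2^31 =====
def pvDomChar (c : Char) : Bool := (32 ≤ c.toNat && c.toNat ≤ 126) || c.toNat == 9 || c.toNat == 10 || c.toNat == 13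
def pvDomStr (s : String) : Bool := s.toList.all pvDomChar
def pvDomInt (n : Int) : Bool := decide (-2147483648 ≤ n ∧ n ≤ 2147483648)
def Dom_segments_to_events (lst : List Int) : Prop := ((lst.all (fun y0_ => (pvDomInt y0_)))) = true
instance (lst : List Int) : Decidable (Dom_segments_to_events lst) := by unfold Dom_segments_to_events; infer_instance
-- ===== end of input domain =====

-- B replaces A's boolean in_sequence state machine (plus a second index→time conversion
-- pass) with a run-skipping scan that emits each time interval directly: alternative decomposition.


-- ===== PORT A =====
-- 'for i in range(len(lst)): ... lst[i] ...' is ported as a fold over the indexed elements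
-- (pvEnumFrom 0 lst), which is exact since i always indexes in range.
def pvEnumFrom (k : Int) : List Int → List (Int × Int)
  | [] => []
  | x :: xs => (k, x) :: pvEnumFrom (k + 1) xs

-- loop body of A: state = (start_end_times, in_sequence, start_index)
def pvAStep (s : List (Int × Int) × Bool × Int) (p : Int × Int) : List (Int × Int) × Bool × Int :=
  if p.2 = 1 then
    if s.2.1 then s else (s.1, true, p.1)
  else
    if s.2.1 then (s.1 ++ [(s.2.2, p.1 - 1)], false, s.2.2) else s

def segments_to_events (lst : List Int) : List Int × (List (Int × Int)) :=
  let s := List.foldl pvAStep (([] : List (Int × Int)), false, (0 : Int)) (pvEnumFrom 0 lst)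
  let start_end_times := if s.2.1 then s.1 ++ [(s.2.2, (lst.length : Int) - 1)] else s.1
  (lst, start_end_times.map (fun p => (p.1 * 4, (p.2 + 1) * 4)))

-- ===== PORT B =====
-- length of the leading run of 1's (B's inner 'while j < n and lst[j] == 1' scan)
def pvCnt : List Int → Nat
  | [] => 0
  | x :: xs => if x = 1 then pvCnt xs + 1 else 0

-- B's outer while loop: at a 1, scan the whole run, emit the interval, jump past it
def pvBGo : List Int → Int → List (Int × Int)
  | [], _ => []
  | x :: xs, k =>
    if x = 1 then
      (k * 4, (k + 1 + (pvCnt xs : Int)) * 4) :: pvBGo (xs.drop (pvCnt xs)) (k + 1 + (pvCnt xs : Int))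
    else
      pvBGo xs (k + 1)
  termination_by xs _ => xs.length
  decreasing_by
    · simp only [List.length_drop, List.length_cons]; omega
    · simp only [List.length_cons]; omega

def segments_to_events_alt (lst : List Int) : List Int × (List (Int × Int)) :=
  (lst, pvBGo lst 0)

-- ===== PRECONDITION & SPEC =====
def Spec_segments_to_events (lst : List Int) (out : List Int × (List (Int × Int))) : Prop := out = segments_to_events_alt lst
instance (lst : List Int) (out : List Int × (List (Int × Int))) : Decidable (Spec_segments_to_events lst out) := by unfold Spec_segments_to_events; infer_instance

-- ===== CLAIM (what is proved, stated in full; the proofs are below) =====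
def Claim_equal_segments_to_events : Prop := ∀ (lst : List Int), Dom_segments_to_events lst → Spec_segments_to_events lst (segments_to_events lst)

-- ===== LEMMAS AND PROOFS =====

-- A's post-loop finish (close a trailing run) and index→time conversion
def pvFin (s : List (Int × Int) × Bool × Int) (lastIdx : Int) : List (Int × Int) :=
  if s.2.1 then s.1 ++ [(s.2.2, lastIdx)] else s.1

def pvConv (p : Int × Int) : Int × Int := (p.1 * 4, (p.2 + 1) * 4)

-- combined invariant for the two states of A's machine, by strong induction on xs.length:
--  (out) starting not-in-sequence, A's finished converted output = acc's plus B's events;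
--  (in)  starting mid-run started at st, A closes that run exactly where pvCnt says B jumps.
theorem pvMain : ∀ n (xs : List Int), xs.length = n →
    (∀ (k st : Int) (acc : List (Int × Int)),
      (pvFin (List.foldl pvAStep (acc, false, st) (pvEnumFrom k xs)) (k + (xs.length : Int) - 1)).map pvConv
        = acc.map pvConv ++ pvBGo xs k) ∧
    (∀ (k st : Int) (acc : List (Int × Int)),
      (pvFin (List.foldl pvAStep (acc, true, st) (pvEnumFrom k xs)) (k + (xs.length : Int) - 1)).map pvConv
        = acc.map pvConv ++ (st * 4, (k + (pvCnt xs : Int)) * 4)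
            :: pvBGo (xs.drop (pvCnt xs)) (k + (pvCnt xs : Int))) := by
  intro n
  induction n using Nat.strong_induction_on with
  | _ n ih =>
    intro xs hlen
    constructor
    · intro k st acc
      match xs, hlen with
      | [], _ => simp [pvEnumFrom, pvFin, pvBGo]
      | x :: xs', hlen =>
        have e : k + (((x :: xs').length : Nat) : Int) - 1 = (k + 1) + (xs'.length : Int) - 1 := by
          simp only [List.length_cons]; push_cast; ring
        rw [e]
        by_cases hx : x = 1
        · have h := (ih xs'.length (by simp [← hlen]) xs' rfl).2 (k + 1) k acc
          subst hx
          simp only [pvEnumFrom, List.foldl_cons]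
          norm_num [pvAStep]
          rw [h]
          simp only [pvBGo]
          push_cast
          ring_nf
        · have h := (ih xs'.length (by simp [← hlen]) xs' rfl).1 (k + 1) st acc
          simp only [pvEnumFrom, List.foldl_cons]
          rw [show pvAStep (acc, false, st) (k, x) = (acc, false, st) by
            simp [pvAStep, hx]]
          rw [h, pvBGo]
          simp [hx]
    · intro k st acc
      match xs, hlen with
      | [], _ =>
        simp [pvEnumFrom, pvFin, pvBGo, pvCnt, pvConv]
      | x :: xs', hlen =>
        have e : k + (((x :: xs').length : Nat) : Int) - 1 = (k + 1) + (xs'.length : Int) - 1 := by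
          simp only [List.length_cons]; push_cast; ring
        rw [e]
        by_cases hx : x = 1
        · have h := (ih xs'.length (by simp [← hlen]) xs' rfl).2 (k + 1) st acc
          subst hx
          simp only [pvEnumFrom, List.foldl_cons]
          rw [show pvAStep (acc, true, st) (k, 1) = (acc, true, st) by
            simp [pvAStep]]
          rw [h]
          simp only [pvCnt]
          push_cast
          ring_nf
          rw [show 1 + pvCnt xs' = pvCnt xs' + 1 by omega]
          simp [List.drop_succ_cons]
        · have h := (ih xs'.length (by simp [← hlen]) xs' rfl).1 (k + 1) st
            (acc ++ [(st, k - 1)])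
          simp only [pvEnumFrom, List.foldl_cons]
          rw [show pvAStep (acc, true, st) (k, x) = (acc ++ [(st, k - 1)], false, st) by
            simp [pvAStep, hx]]
          rw [h]
          simp [pvCnt, hx, pvConv, pvBGo]

-- ===== VERDICT (by name: the statement is the Claim_ definition above) =====
theorem segments_to_events_spec : Claim_equal_segments_to_events := by
  intro lst _
  unfold Spec_segments_to_events segments_to_events segments_to_events_alt
  have h := (pvMain lst.length lst rfl).1 0 0 []
  simp only [List.map_nil, List.nil_append] at h
  simp only []
  rw [show (fun p => (p.1 * 4, (p.2 + 1) * 4) : Int × Int → Int × Int) = pvConv from rfl]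
  have : (if (List.foldl pvAStep ([], false, 0) (pvEnumFrom 0 lst)).2.1 then
      (List.foldl pvAStep ([], false, 0) (pvEnumFrom 0 lst)).1 ++
        [((List.foldl pvAStep ([], false, 0) (pvEnumFrom 0 lst)).2.2, (lst.length : Int) - 1)]
    else (List.foldl pvAStep ([], false, 0) (pvEnumFrom 0 lst)).1)
      = pvFin (List.foldl pvAStep ([], false, 0) (pvEnumFrom 0 lst)) (0 + (lst.length : Int) - 1) := by
    simp [pvFin]
  rw [this, h]
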